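-- pv_equiv track=rewrite | github.com/gooser74/R107 | tp3/ex1.py | analyze_values
-- ===== SOURCE A (Python) =====
-- def analyze_values(values):
--     count_below_10 = 0
--     count_below_15 = 0
--     count_above_15 = 0
--
--     for value in values:
--         if value < 10:
--             count_below_10 += 1
--         elif value < 15:
--             count_below_15 += 1
--         else:
--             count_above_15 += 1
--
--     return count_below_10, count_below_15, count_above_15
-- ===== SOURCE B (Python) =====
-- def analyze_values(values):
--     vals = list(values)
--     below10 = sum(1 for v in vals if v < 10)
--     below15 = sum(1 for v in vals if 10 <= v < 15)
--     return below10, below15, len(vals) - below10 - below15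
-- ===== Notes on version B (the rewrite author's own statement) =====
-- stated objective: idiomatic
-- what changed: Replaces the single three-way-branching accumulator loop by two independent filtered counts plus a length subtraction for the third component.
import Mathlib
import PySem

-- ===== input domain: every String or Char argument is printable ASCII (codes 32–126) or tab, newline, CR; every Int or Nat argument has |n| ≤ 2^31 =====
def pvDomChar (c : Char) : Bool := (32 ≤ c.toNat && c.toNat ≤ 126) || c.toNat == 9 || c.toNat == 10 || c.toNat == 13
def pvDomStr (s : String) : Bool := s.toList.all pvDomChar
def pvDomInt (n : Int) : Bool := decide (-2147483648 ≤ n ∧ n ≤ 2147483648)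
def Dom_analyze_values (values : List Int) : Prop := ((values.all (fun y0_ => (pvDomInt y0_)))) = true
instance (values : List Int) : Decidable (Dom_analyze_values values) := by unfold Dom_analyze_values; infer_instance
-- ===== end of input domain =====

-- B counts the two lower bands by filtering and derives the third from the length; same values, different decomposition (idiomatic).

-- ===== PORT A =====
def analyze_values (values : List Int) : Int × Int × Int :=
  values.foldl
    (fun (s : Int × Int × Int) value =>
      if value < 10 then (s.1 + 1, s.2.1, s.2.2)
      else if value < 15 then (s.1, s.2.1 + 1, s.2.2)
      else (s.1, s.2.1, s.2.2 + 1))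
    (0, 0, 0)

-- ===== PORT B =====
def analyze_values_alt (values : List Int) : Int × Int × Int :=
  let below10 : Int := ((values.filter (fun v => v < 10)).length : Int)
  let below15 : Int := ((values.filter (fun v => 10 ≤ v ∧ v < 15)).length : Int)
  (below10, below15, (values.length : Int) - below10 - below15)

-- ===== PRECONDITION & SPEC =====
def Spec_analyze_values (values : List Int) (out : Int × Int × Int) : Prop := out = analyze_values_alt values
instance (values : List Int) (out : Int × Int × Int) : Decidable (Spec_analyze_values values out) := by unfold Spec_analyze_values; infer_instance

-- ===== CLAIM (what is proved, stated in full; the proofs are below) =====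
def Claim_equal_analyze_values : Prop := ∀ (values : List Int), Dom_analyze_values values → Spec_analyze_values values (analyze_values values)

-- ===== LEMMAS AND PROOFS =====
theorem analyze_values_foldl (l : List Int) (a b c : Int) :
    l.foldl
      (fun (s : Int × Int × Int) value =>
        if value < 10 then (s.1 + 1, s.2.1, s.2.2)
        else if value < 15 then (s.1, s.2.1 + 1, s.2.2)
        else (s.1, s.2.1, s.2.2 + 1))
      (a, b, c)
    = (a + ((l.filter (fun v => v < 10)).length : Int),
       b + ((l.filter (fun v => 10 ≤ v ∧ v < 15)).length : Int),
       c + ((l.length : Int) - ((l.filter (fun v => v < 10)).length : Int)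
              - ((l.filter (fun v => 10 ≤ v ∧ v < 15)).length : Int))) := by
  induction l generalizing a b c with
  | nil => simp
  | cons x xs ih =>
    by_cases h10 : x < 10
    · simp [List.foldl_cons, h10, ih, Prod.ext_iff]
      omega
    · by_cases h15 : x < 15
      · simp [List.foldl_cons, h10, h15, ih, Prod.ext_iff, show (10 : Int) ≤ x from by omega]
        omega
      · simp [List.foldl_cons, h10, h15, ih, Prod.ext_iff, show ¬ (10 : Int) ≤ x ∨ ¬ x < 15 from by omega]
        omega

-- ===== VERDICT (by name: the statement is the Claim_ definition above) =====
theorem analyze_values_spec : Claim_equal_analyze_values := by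
  intro values _
  unfold Spec_analyze_values analyze_values analyze_values_alt
  rw [analyze_values_foldl]
  simp
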